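-- pv_equiv track=rewrite | github.com/NithyaKrishnan08/LeetCode-HackerRank | InterviewQuestions/pilesOfBoxes.py | minStepsToEqualHeight
-- ===== SOURCE A (Python) =====
-- def minStepsToEqualHeight(arrOfHeights):
--     if len(arrOfHeights) <= 1:
--       return 0
--
--     arrOfHeights.sort(reverse=True)
--     steps = 0
--     i = 0
--     while i < len(arrOfHeights) - 1:
--       if arrOfHeights[i + 1] < arrOfHeights[i]:
--         steps += i + 1
--       i += 1
--     return steps
-- ===== SOURCE B (Python) =====
-- def minStepsToEqualHeight(arrOfHeights):
--     # Each box must be lowered once for every distinct height strictly below its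
--     # own, so the answer is the sum over all boxes of that count: the box's rank
--     # in the ascending list of distinct heights.  No boundary scan is needed.
--     if len(arrOfHeights) <= 1:
--         return 0
--     arrOfHeights.sort(reverse=True)  # keep A's observable in-place sort
--     rank = {v: r for r, v in enumerate(sorted(set(arrOfHeights)))}
--     return sum(rank[v] for v in arrOfHeights)
-- ===== Notes on version B (the rewrite author's own statement) =====
-- stated objective: alternative
-- what changed: Replaces A's boundary scan of the descending-sorted list (add the prefix length at every adjacent strict drop) with a closed-form per-element count: a dict maps each distinct height to its rank in the ascending list of distinct heights (= number of distinct heights strictly below it), and the answer is the sum of ranks over all boxes.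
import Mathlib
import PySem

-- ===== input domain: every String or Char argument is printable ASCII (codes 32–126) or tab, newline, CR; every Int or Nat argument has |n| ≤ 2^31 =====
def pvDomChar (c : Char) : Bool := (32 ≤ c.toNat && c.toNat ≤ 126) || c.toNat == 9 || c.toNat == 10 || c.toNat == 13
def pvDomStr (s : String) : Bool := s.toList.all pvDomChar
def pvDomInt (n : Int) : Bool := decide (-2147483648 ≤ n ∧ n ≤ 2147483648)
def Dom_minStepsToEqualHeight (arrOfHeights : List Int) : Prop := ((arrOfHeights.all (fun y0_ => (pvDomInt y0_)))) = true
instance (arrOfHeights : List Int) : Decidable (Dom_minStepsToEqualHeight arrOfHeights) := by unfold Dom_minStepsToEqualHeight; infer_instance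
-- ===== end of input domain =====

-- B replaces A's boundary scan with a closed-form count: each box contributes its
-- rank (index in the ascending list of distinct heights) = number of distinct
-- heights strictly below it (alternative decomposition, same results). Both
-- Pythons sort the argument in place; the equivalence proved is about the return value.


-- ===== PORT A =====
-- A: sort descending in place, then while i < len-1: if s[i+1] < s[i] then steps += i+1.
def minStepsToEqualHeight (arrOfHeights : List Int) : Int :=
  if arrOfHeights.length ≤ 1 then 0
  else
    let s := PySem.List.sorted arrOfHeights (fun x => x) true
    (PySem.List.pyRange 0 ((s.length : Int) - 1) 1).foldl
      (fun steps i =>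
        if PySem.List.pyGetD s (i + 1) 0 < PySem.List.pyGetD s i 0 then steps + (i + 1)
        else steps) 0

-- ===== PORT B =====
-- B: sort in place (A's observable mutation), then rank = {v: r for r, v in
-- enumerate(sorted(set(...)))} and answer = sum of rank[v].  v is always a key of
-- rank, so the KeyError branch of rank[v] is unreachable; `getD 0` fills it.
def minStepsToEqualHeight_alt (arrOfHeights : List Int) : Int :=
  if arrOfHeights.length ≤ 1 then 0
  else
    let s := PySem.List.sorted arrOfHeights (fun x => x) true
    let rank := (PySem.List.enumerate (PySem.List.sorted (PySem.Set.ofList s) (fun x => x) false) 0).foldl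
      (fun d p => d.insert p.2 p.1) (PySem.Dict.empty : PySem.Dict Int Int)
    (s.map (fun v => rank.getD v 0)).sum

-- ===== PRECONDITION & SPEC =====
def Spec_minStepsToEqualHeight (arrOfHeights : List Int) (out : Int) : Prop := out = minStepsToEqualHeight_alt arrOfHeights
instance (arrOfHeights : List Int) (out : Int) : Decidable (Spec_minStepsToEqualHeight arrOfHeights out) := by unfold Spec_minStepsToEqualHeight; infer_instance

-- ===== CLAIM (what is proved, stated in full; the proofs are below) =====
def Claim_equal_minStepsToEqualHeight : Prop := ∀ (arrOfHeights : List Int), Dom_minStepsToEqualHeight arrOfHeights → Spec_minStepsToEqualHeight arrOfHeights (minStepsToEqualHeight arrOfHeights)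

-- ===== LEMMAS AND PROOFS =====

-- A's loop as a structural recursion over adjacent pairs (i = index of the head).
def stepsRec : List Int → Int → Int
  | a :: b :: t, i => (if b < a then i + 1 else 0) + stepsRec (b :: t) (i + 1)
  | _, _ => 0

-- number of adjacent strict drops in the (sorted) list
def drops : List Int → Int
  | a :: b :: t => (if b < a then 1 else 0) + drops (b :: t)
  | _ => 0

theorem key_sum (s : List Int) (i0 : Int) :
    ((List.range (s.length - 1)).map
      (fun k => if s.getD (k+1) 0 < s.getD k 0 then i0 + (k : Int) + 1 else 0)).sum
    = stepsRec s i0 := by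
  induction s generalizing i0 with
  | nil => simp [stepsRec]
  | cons a tl IH =>
    cases tl with
    | nil => simp [stepsRec]
    | cons b t =>
      have : (a :: b :: t).length - 1 = t.length + 1 := by simp
      rw [this, List.range_succ_eq_map]
      simp only [List.map_cons, List.map_map, List.sum_cons, stepsRec]
      congr 1
      · simp
      · rw [← IH (i0 + 1)]
        congr 1
        apply List.map_congr_left
        intro k _
        simp only [Function.comp_apply, Nat.succ_eq_add_one, List.getD_cons_succ]
        congr 1
        push_cast
        ring

-- A's index loop computes stepsRec s 0 (pure bookkeeping; no order assumption).
theorem aLoop_eq_stepsRec (s : List Int) :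
    (PySem.List.pyRange 0 ((s.length : Int) - 1) 1).foldl
      (fun steps i =>
        if PySem.List.pyGetD s (i + 1) 0 < PySem.List.pyGetD s i 0 then steps + (i + 1)
        else steps) 0 = stepsRec s 0 := by
  have hb : (PySem.List.pyRange 0 ((s.length : Int) - 1) 1).foldl
      (fun steps i =>
        if PySem.List.pyGetD s (i + 1) 0 < PySem.List.pyGetD s i 0 then steps + (i + 1)
        else steps) 0
      = (PySem.List.pyRange 0 ((s.length : Int) - 1) 1).foldl
      (fun steps i =>
        steps + (if PySem.List.pyGetD s (i + 1) 0 < PySem.List.pyGetD s i 0 then i + 1 else 0)) 0 := by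
    apply PySem.List.foldl_congr_mem
    intro acc x _
    split_ifs <;> simp
  rw [hb, PySem.List.foldl_add, PySem.List.pyRange_one]
  rw [← key_sum s 0]
  simp only [List.map_map, zero_add]
  have hr : ((s.length : Int) - 1 - 0).toNat = s.length - 1 := by omega
  rw [hr]
  apply congrArg
  apply List.map_congr_left
  intro k hk
  have h2 : ((k:Int) + 1) = (((k+1 : Nat)) : Int) := by push_cast; ring
  simp only [Function.comp_apply, h2, PySem.List.pyGetD_natCast]

-- levels.index(v) on a strictly increasing list = number of elements below v
theorem index_strict_mono (levels : List Int) (v : Int)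
    (hp : levels.Pairwise (· < ·)) (hv : v ∈ levels) :
    ((PySem.List.index? levels v).getD 0 : Nat) = levels.countP (fun d => d < v) := by
  induction levels with
  | nil => cases hv
  | cons h t IH =>
    by_cases hvh : h = v
    · subst hvh
      rw [PySem.List.index?_cons_self]
      have hz : (h :: t).countP (fun d => d < h) = 0 := by
        rw [List.countP_eq_zero]
        intro d hd
        rcases List.mem_cons.mp hd with rfl | hdt
        · simp
        · simpa using not_lt.mpr (le_of_lt ((List.pairwise_cons.mp hp).1 d hdt))
      simp [hz]
    · have hvt : v ∈ t := by
        rcases List.mem_cons.mp hv with rfl | hdt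
        · exact absurd rfl hvh
        · exact hdt
      have hlt : h < v := (List.pairwise_cons.mp hp).1 v hvt
      rw [PySem.List.index?_cons_of_ne t hvh]
      have hsome : (PySem.List.index? t v).isSome := by
        rw [PySem.List.index?_isSome_iff]; exact hvt
      rcases Option.isSome_iff_exists.mp hsome with ⟨k, hk⟩
      rw [List.countP_cons]
      have hIH := IH (List.pairwise_cons.mp hp).2 hvt
      rw [hk] at hIH ⊢
      simp only [Option.map_some, Option.getD_some] at hIH ⊢
      simp [hIH, hlt]

-- countP over a duplicate-free list is a Finset count over its value set
theorem countP_nodup_eq_card (l : List Int) (hl : l.Nodup) (v : Int) :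
    l.countP (fun d => d < v) = (l.toFinset.filter (fun d => d < v)).card := by
  rw [List.countP_eq_length_filter]
  rw [← List.toFinset_card_of_nodup (List.Nodup.filter _ hl)]
  congr 1
  ext x
  simp

-- on a descending-sorted nonempty list: #distinct = drops + 1
theorem card_toFinset_sorted (h : Int) (t : List Int)
    (hp : (h :: t).Pairwise (fun a b => b ≤ a)) :
    ((h :: t).toFinset.card : Int) = drops (h :: t) + 1 := by
  induction t generalizing h with
  | nil => simp [drops]
  | cons h2 t IH =>
    have hcp := List.pairwise_cons.mp hp
    have h21 : h2 ≤ h := hcp.1 h2 (by simp)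
    by_cases heq : h = h2
    · subst heq
      have : (h :: h :: t).toFinset = (h :: t).toFinset := by
        simp [List.toFinset_cons]
      rw [this, IH h hcp.2]
      simp [drops]
    · have hlt : h2 < h := lt_of_le_of_ne h21 (fun e => heq e.symm)
      have hnm : h ∉ (h2 :: t).toFinset := by
        rw [List.mem_toFinset]
        intro hmem
        have : h ≤ h2 := by
          rcases List.mem_cons.mp hmem with rfl | hmt
          · exact le_refl _
          · exact le_trans ((List.pairwise_cons.mp hcp.2).1 h hmt) (le_refl h2)
        omega
      have hI := IH h2 hcp.2
      rw [List.toFinset_cons, Finset.card_insert_of_notMem hnm]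
      simp only [drops]
      rw [if_pos hlt]
      push_cast at hI ⊢
      omega

-- on a descending-sorted nonempty list: #distinct below the head = drops
theorem card_below_head_sorted (h : Int) (t : List Int)
    (hp : (h :: t).Pairwise (fun a b => b ≤ a)) :
    (((h :: t).toFinset.filter (fun d => d < h)).card : Int) = drops (h :: t) := by
  induction t generalizing h with
  | nil => simp [drops]
  | cons h2 t IH =>
    have hcp := List.pairwise_cons.mp hp
    have h21 : h2 ≤ h := hcp.1 h2 (by simp)
    have hdrop : (h :: h2 :: t).toFinset.filter (fun d => d < h)
        = (h2 :: t).toFinset.filter (fun d => d < h) := by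
      rw [List.toFinset_cons, Finset.filter_insert, if_neg (lt_irrefl h)]
    by_cases heq : h = h2
    · subst heq
      rw [hdrop, IH h hcp.2]
      simp [drops]
    · have hlt : h2 < h := lt_of_le_of_ne h21 (fun e => heq e.symm)
      have hall : (h2 :: t).toFinset.filter (fun d => d < h) = (h2 :: t).toFinset := by
        apply Finset.filter_true_of_mem
        intro d hd
        rw [List.mem_toFinset] at hd
        have : d ≤ h2 := by
          rcases List.mem_cons.mp hd with rfl | hmt
          · exact le_refl _
          · exact (List.pairwise_cons.mp hcp.2).1 d hmt
        omega
      rw [hdrop, hall, card_toFinset_sorted h2 t hcp.2]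
      simp only [drops]
      rw [if_pos hlt]
      ring

-- main invariant: on a descending-sorted list, the adjacent-pair scan equals the
-- per-element distinct-below count (plus i moves per remaining drop)
theorem stepsRec_eq_rankSum (s : List Int) (hp : s.Pairwise (fun a b => b ≤ a)) (i : Int) :
    stepsRec s i
      = (s.map (fun v => ((s.toFinset.filter (fun d => d < v)).card : Int))).sum + i * drops s := by
  induction s generalizing i with
  | nil => simp [stepsRec, drops]
  | cons a tl IH =>
    cases tl with
    | nil => simp [stepsRec, drops, Finset.filter_singleton]
    | cons b t =>
      have hcp := List.pairwise_cons.mp hp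
      have hba : b ≤ a := hcp.1 b (by simp)
      -- (i) the head's count
      have hhead : (((a :: b :: t).toFinset.filter (fun d => d < a)).card : Int)
          = (if b < a then 1 else 0) + drops (b :: t) := by
        have hdrop : (a :: b :: t).toFinset.filter (fun d => d < a)
            = (b :: t).toFinset.filter (fun d => d < a) := by
          rw [List.toFinset_cons, Finset.filter_insert, if_neg (lt_irrefl a)]
        by_cases hlt : b < a
        · have hall : (b :: t).toFinset.filter (fun d => d < a) = (b :: t).toFinset := by
            apply Finset.filter_true_of_mem
            intro d hd
            rw [List.mem_toFinset] at hd
            have : d ≤ b := by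
              rcases List.mem_cons.mp hd with rfl | hmt
              · exact le_refl _
              · exact (List.pairwise_cons.mp hcp.2).1 d hmt
            omega
          rw [hdrop, hall, card_toFinset_sorted b t hcp.2, if_pos hlt]
          ring
        · have heq : b = a := le_antisymm hba (not_lt.mp hlt)
          subst heq
          rw [hdrop, card_below_head_sorted b t hcp.2, if_neg hlt]
          ring
      -- (ii) tail elements count the same in the full set
      have htail : ∀ v ∈ b :: t,
          ((a :: b :: t).toFinset.filter (fun d => d < v)).card
            = ((b :: t).toFinset.filter (fun d => d < v)).card := by
        intro v hv
        have hva : v ≤ a := hcp.1 v hv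
        rw [List.toFinset_cons, Finset.filter_insert, if_neg (by omega)]
      have hmt : ((b :: t).map (fun v => (((a :: b :: t).toFinset.filter (fun d => d < v)).card : Int)))
          = ((b :: t).map (fun v => (((b :: t).toFinset.filter (fun d => d < v)).card : Int))) := by
        apply List.map_congr_left
        intro v hv
        rw [htail v hv]
      rw [stepsRec, IH hcp.2 (i + 1)]
      conv_rhs => rw [List.map_cons, List.sum_cons]
      rw [hmt, hhead]
      simp only [drops]
      split_ifs with hlt <;> ring

-- inserting pairs whose keys all differ from v does not change the lookup at v
theorem getD_foldl_insert_of_not_mem (l : List (Int × Int)) (d : PySem.Dict Int Int)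
    (v : Int) (h : ∀ p ∈ l, p.2 ≠ v) :
    (l.foldl (fun d p => d.insert p.2 p.1) d).getD v 0 = d.getD v 0 := by
  induction l generalizing d with
  | nil => rfl
  | cons p t IH =>
    rw [List.foldl_cons, IH _ (fun q hq => h q (List.mem_cons_of_mem p hq))]
    exact PySem.Dict.getD_insert_of_ne _ _ _ (Ne.symm (h p (by simp)))

-- the rank dict looks up v's index in the (duplicate-free) levels list
theorem dict_rank_eq_index (levels : List Int) (hl : levels.Nodup) (v : Int)
    (hv : v ∈ levels) : ∀ (s0 : Int) (d : PySem.Dict Int Int),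
    ((PySem.List.enumerate levels s0).foldl (fun d p => d.insert p.2 p.1) d).getD v 0
      = s0 + (((PySem.List.index? levels v).getD 0 : Nat) : Int) := by
  induction levels with
  | nil => cases hv
  | cons h t IH =>
    intro s0 d
    rw [PySem.List.enumerate_cons, List.foldl_cons]
    by_cases hvh : h = v
    · subst hvh
      have hnt : h ∉ t := (List.nodup_cons.mp hl).1
      have hkeys : ∀ p ∈ PySem.List.enumerate t (s0 + 1), p.2 ≠ h := by
        intro p hp
        rcases (PySem.List.mem_enumerate_iff t (s0 + 1) p).mp hp with ⟨k, hk, hpe⟩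
        subst hpe
        intro e
        exact hnt (e ▸ List.getElem_mem hk)
      rw [getD_foldl_insert_of_not_mem _ _ _ hkeys, PySem.Dict.getD_insert_self,
        PySem.List.index?_cons_self]
      simp
    · have hvt : v ∈ t := by
        rcases List.mem_cons.mp hv with rfl | hdt
        · exact absurd rfl hvh
        · exact hdt
      have hsome : (PySem.List.index? t v).isSome := by
        rw [PySem.List.index?_isSome_iff]; exact hvt
      rcases Option.isSome_iff_exists.mp hsome with ⟨k, hk⟩
      rw [IH (List.nodup_cons.mp hl).2 hvt (s0 + 1) _,
        PySem.List.index?_cons_of_ne t hvh, hk]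
      simp only [Option.map_some, Option.getD_some]
      push_cast
      ring

-- per-element value of B's port = the Finset count of distinct values below v
theorem bElem_eq_card (s : List Int) (v : Int) (hv : v ∈ s) :
    ((PySem.List.enumerate (PySem.List.sorted (PySem.Set.ofList s) (fun x => x) false) 0).foldl
        (fun d p => d.insert p.2 p.1) (PySem.Dict.empty : PySem.Dict Int Int)).getD v 0
      = ((s.toFinset.filter (fun d => d < v)).card : Int) := by
  set levels := PySem.List.sorted (PySem.Set.ofList s) (fun x => x) false with hl
  have hvl : v ∈ levels := by
    rw [hl, PySem.List.mem_sorted, PySem.Set.mem_ofList]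
    exact hv
  have hnd : levels.Nodup :=
    ((PySem.List.sorted_perm (PySem.Set.ofList s) (fun x => x) false).nodup_iff).mpr
      (PySem.Set.nodup_ofList s)
  have h0 := dict_rank_eq_index levels hnd v hvl 0 PySem.Dict.empty
  rw [zero_add] at h0
  have h1 := index_strict_mono levels v (PySem.List.sorted_ofList_pairwise_lt s) hvl
  have h2 : levels.countP (fun d => d < v) = (PySem.Set.ofList s).countP (fun d => d < v) :=
    (PySem.List.sorted_perm (PySem.Set.ofList s) (fun x => x) false).countP_eq _
  have h3 := countP_nodup_eq_card (PySem.Set.ofList s) (PySem.Set.nodup_ofList s) v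
  have h4 : (PySem.Set.ofList s : List Int).toFinset = s.toFinset := by
    ext x
    simp [List.mem_toFinset, PySem.Set.mem_ofList]
  rw [h0, h1, h2, h3, h4]

-- ===== VERDICT (by name: the statement is the Claim_ definition above) =====
theorem minStepsToEqualHeight_spec : Claim_equal_minStepsToEqualHeight := by
  intro arr _
  unfold Spec_minStepsToEqualHeight minStepsToEqualHeight minStepsToEqualHeight_alt
  by_cases h : arr.length ≤ 1
  · simp [h]
  · simp only [h, if_false]
    set s := PySem.List.sorted arr (fun x => x) true with hs
    rw [aLoop_eq_stepsRec, stepsRec_eq_rankSum s (PySem.List.sorted_pairwise_rev ..) 0]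
    simp only [zero_mul, add_zero]
    apply congrArg
    apply List.map_congr_left
    intro v hv
    exact (bElem_eq_card s v hv).symm
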